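-- pv_equiv track=rewrite | github.com/dschaehi/capturing-word-order | src/disc.py | get_candidate_trigrams
-- ===== SOURCE A (Python) =====
-- import itertools
--
-- def get_candidate_trigrams(candidate_sents):
--     candidate_trigrams = sorted(
--         set(
--             itertools.chain.from_iterable(
--                 (
--                     (candidate_sent[i], candidate_sent[i + 1], candidate_sent[i + 2])
--                     for i in range(len(candidate_sent) - 2)
--                 )
--                 for candidate_sent in candidate_sents
--             )
--         )
--     )
--     return candidate_trigrams
-- ===== SOURCE B (Python) =====
-- def get_candidate_trigrams(candidate_sents):
--     # Insert each trigram into an unbalanced binary search tree (duplicates are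
--     # dropped at the matching node); an in-order traversal then yields the sorted
--     # unique trigrams directly -- no hash set and no sort call at all.
--     root = None  # node = [left, trigram, right]
--     for sent in candidate_sents:
--         for i in range(len(sent) - 2):
--             t = (sent[i], sent[i + 1], sent[i + 2])
--             if root is None:
--                 root = [None, t, None]
--                 continue
--             node = root
--             while True:
--                 if t < node[1]:
--                     if node[0] is None:
--                         node[0] = [None, t, None]
--                         break
--                     node = node[0]
--                 elif node[1] < t:
--                     if node[2] is None:
--                         node[2] = [None, t, None]
--                         break
--                     node = node[2]
--                 else:
--                     break  # duplicate
--     out = []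
--     stack = []
--     node = root
--     while stack or node is not None:
--         while node is not None:
--             stack.append(node)
--             node = node[0]
--         node = stack.pop()
--         out.append(node[1])
--         node = node[2]
--     return out
-- ===== Notes on version B (the rewrite author's own statement) =====
-- stated objective: alternative
-- what changed: B replaces A's hash-set accumulation followed by a sort with a binary search tree: every trigram is inserted into an unbalanced BST (duplicates dropped at the matching node) and the sorted unique result is read off by an in-order traversal, with no set and no sort call.
import Mathlib
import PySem

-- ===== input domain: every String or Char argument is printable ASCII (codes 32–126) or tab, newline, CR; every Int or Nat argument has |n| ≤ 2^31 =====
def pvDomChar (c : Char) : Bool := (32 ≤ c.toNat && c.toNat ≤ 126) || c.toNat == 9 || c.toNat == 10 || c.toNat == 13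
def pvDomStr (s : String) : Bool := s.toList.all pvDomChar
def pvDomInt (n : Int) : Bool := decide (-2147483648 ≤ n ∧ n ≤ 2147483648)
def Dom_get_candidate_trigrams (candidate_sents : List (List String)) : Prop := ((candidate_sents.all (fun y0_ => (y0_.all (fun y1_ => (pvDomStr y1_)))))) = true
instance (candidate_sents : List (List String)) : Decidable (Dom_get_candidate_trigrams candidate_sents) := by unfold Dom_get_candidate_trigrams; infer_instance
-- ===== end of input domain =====

-- ===== PORT A =====
-- B builds a binary search tree instead of A's hash set + sort; same return value, no speed claim.
-- trigKey: Python compares 3-tuples of str lexicographically; PySem has no triple order, so the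
-- comparison is ported by hand as the lexicographic order String ×ₗ String ×ₗ String — exact for Python's tuple <.
def trigKey (t : String × String × String) : String ×ₗ String ×ₗ String :=
  toLex (t.1, toLex (t.2.1, t.2.2))

-- the per-sentence generator '((s[i], s[i+1], s[i+2]) for i in range(len(s) - 2))'
def pvGenA (s : List String) : List (String × String × String) :=
  (PySem.List.pyRange 0 (PySem.List.len s - 2) 1).map (fun i =>
    (PySem.List.pyGetD s i "", PySem.List.pyGetD s (i + 1) "", PySem.List.pyGetD s (i + 2) ""))

def get_candidate_trigrams (candidate_sents : List (List String)) : List (String × String × String) :=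
  PySem.List.sorted (PySem.Set.ofList (candidate_sents.flatMap pvGenA)) trigKey false

-- ===== PORT B =====
-- B's mutable 'node = [left, trigram, right]' tree (None = empty)
inductive PvTree
  | leaf
  | node : PvTree → (String × String × String) → PvTree → PvTree
deriving Repr

-- B's iterative descent 'while True: ... t < node[1] / node[1] < t / break'; the in-place
-- link mutation becomes the obvious structural recursion rebuilding the spine (exact: same
-- comparisons in the same order, duplicate dropped at the matching node).
def pvInsert : PvTree → (String × String × String) → PvTree
  | .leaf, t => .node .leaf t .leaf
  | .node l k r, t =>
    if trigKey t < trigKey k then .node (pvInsert l t) k r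
    else if trigKey k < trigKey t then .node l k (pvInsert r t)
    else .node l k r

-- B's explicit-stack in-order loop, written as the structural in-order traversal it computes
def pvInorder : PvTree → List (String × String × String)
  | .leaf => []
  | .node l k r => pvInorder l ++ k :: pvInorder r

def get_candidate_trigrams_alt (candidate_sents : List (List String)) : List (String × String × String) :=
  pvInorder (candidate_sents.foldl (fun root s =>
    (PySem.List.pyRange 0 (PySem.List.len s - 2) 1).foldl (fun root i =>
      pvInsert root (PySem.List.pyGetD s i "", PySem.List.pyGetD s (i + 1) "",
        PySem.List.pyGetD s (i + 2) "")) root) .leaf)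

-- ===== PRECONDITION & SPEC =====
def Spec_get_candidate_trigrams (candidate_sents : List (List String)) (out : List (String × String × String)) : Prop := out = get_candidate_trigrams_alt candidate_sents
instance (candidate_sents : List (List String)) (out : List (String × String × String)) : Decidable (Spec_get_candidate_trigrams candidate_sents out) := by unfold Spec_get_candidate_trigrams; infer_instance

-- ===== CLAIM (what is proved, stated in full; the proofs are below) =====
def Claim_equal_get_candidate_trigrams : Prop := ∀ (candidate_sents : List (List String)), Dom_get_candidate_trigrams candidate_sents → Spec_get_candidate_trigrams candidate_sents (get_candidate_trigrams candidate_sents)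

-- ===== LEMMAS AND PROOFS =====

theorem trigKey_injective : Function.Injective trigKey := by
  intro a b h
  obtain ⟨a1, a2, a3⟩ := a; obtain ⟨b1, b2, b3⟩ := b
  simp only [trigKey, toLex] at h
  simp_all [Prod.ext_iff]

-- search-tree invariant, stated over the in-order traversal
def pvIsBST : PvTree → Prop
  | .leaf => True
  | .node l k r => pvIsBST l ∧ pvIsBST r ∧
      (∀ x ∈ pvInorder l, trigKey x < trigKey k) ∧
      (∀ x ∈ pvInorder r, trigKey k < trigKey x)

theorem pv_mem_insert (t : PvTree) (y x : String × String × String) :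
    x ∈ pvInorder (pvInsert t y) ↔ x = y ∨ x ∈ pvInorder t := by
  induction t with
  | leaf => simp [pvInsert, pvInorder]
  | node l k r ihl ihr =>
    by_cases h1 : trigKey y < trigKey k
    · simp [pvInsert, h1, pvInorder, ihl]; tauto
    · by_cases h2 : trigKey k < trigKey y
      · simp [pvInsert, h1, h2, pvInorder, ihr]; tauto
      · have hyk : y = k := trigKey_injective (le_antisymm (not_lt.mp h2) (not_lt.mp h1))
        subst hyk
        simp [pvInsert, pvInorder]; tauto

theorem pv_isBST_insert (t : PvTree) (y : String × String × String) (h : pvIsBST t) :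
    pvIsBST (pvInsert t y) := by
  induction t with
  | leaf => exact ⟨trivial, trivial, by simp [pvInorder], by simp [pvInorder]⟩
  | node l k r ihl ihr =>
    obtain ⟨hl, hr, hkl, hkr⟩ := h
    unfold pvInsert
    by_cases h1 : trigKey y < trigKey k
    · rw [if_pos h1]
      refine ⟨ihl hl, hr, ?_, hkr⟩
      intro x hx
      rcases (pv_mem_insert l y x).mp hx with hxy | hxl
      · exact hxy ▸ h1
      · exact hkl x hxl
    · rw [if_neg h1]
      by_cases h2 : trigKey k < trigKey y
      · rw [if_pos h2]
        refine ⟨hl, ihr hr, hkl, ?_⟩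
        intro x hx
        rcases (pv_mem_insert r y x).mp hx with hxy | hxr
        · exact hxy ▸ h2
        · exact hkr x hxr
      · rw [if_neg h2]
        exact ⟨hl, hr, hkl, hkr⟩

theorem pv_inorder_pairwise (t : PvTree) (h : pvIsBST t) :
    (pvInorder t).Pairwise (fun a b => trigKey a < trigKey b) := by
  induction t with
  | leaf => simp [pvInorder]
  | node l k r ihl ihr =>
    obtain ⟨hl, hr, hkl, hkr⟩ := h
    simp only [pvInorder]
    rw [List.pairwise_append]
    refine ⟨ihl hl, List.pairwise_cons.mpr ⟨hkr, ihr hr⟩, ?_⟩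
    intro a ha b hb
    rcases List.mem_cons.mp hb with hb | hb
    · exact hb ▸ hkl a ha
    · exact lt_trans (hkl a ha) (hkr b hb)

-- folding insert over a list: BST preserved, membership = old ∪ inserted
theorem pv_foldl_insert (ts : List (String × String × String)) :
    ∀ t, pvIsBST t →
      pvIsBST (ts.foldl pvInsert t) ∧
      (∀ x, x ∈ pvInorder (ts.foldl pvInsert t) ↔ x ∈ pvInorder t ∨ x ∈ ts) := by
  induction ts with
  | nil => intro t ht; simpa using ht
  | cons y ts ih =>
    intro t ht
    obtain ⟨hb, hm⟩ := ih (pvInsert t y) (pv_isBST_insert t y ht)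
    refine ⟨hb, fun x => ?_⟩
    rw [List.foldl_cons] at *
    rw [hm x, pv_mem_insert]
    simp; tauto

-- the nested folds of B insert exactly the flattened trigram list of A
theorem pv_fold_eq_flat (cs : List (List String)) :
    ∀ t, cs.foldl (fun root s =>
        (PySem.List.pyRange 0 (PySem.List.len s - 2) 1).foldl (fun root i =>
          pvInsert root (PySem.List.pyGetD s i "", PySem.List.pyGetD s (i + 1) "",
            PySem.List.pyGetD s (i + 2) "")) root) t
      = (cs.flatMap pvGenA).foldl pvInsert t := by
  induction cs with
  | nil => intro t; simp
  | cons s cs ih =>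
    intro t
    simp only [List.foldl_cons, List.flatMap_cons, List.foldl_append, ih]
    congr 1
    rw [pvGenA, List.foldl_map]

-- ===== VERDICT (by name: the statement is the Claim_ definition above) =====
theorem get_candidate_trigrams_spec : Claim_equal_get_candidate_trigrams := by
  intro cs _
  unfold Spec_get_candidate_trigrams get_candidate_trigrams get_candidate_trigrams_alt
  rw [pv_fold_eq_flat]
  set L := cs.flatMap pvGenA with hL
  obtain ⟨hb, hm⟩ := pv_foldl_insert L PvTree.leaf trivial
  have hp := pv_inorder_pairwise _ hb
  have hnodup : (pvInorder (L.foldl pvInsert .leaf)).Nodup :=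
    hp.imp fun {a b} hab => fun he => absurd (he ▸ hab) (lt_irrefl _)
  have hperm : (pvInorder (L.foldl pvInsert .leaf)).Perm (PySem.Set.ofList L) := by
    rw [List.perm_ext_iff_of_nodup hnodup (PySem.Set.nodup_ofList L)]
    intro z
    rw [hm z]
    simp [pvInorder, PySem.Set.mem_ofList]
  exact PySem.List.sorted_eq_of_perm_of_pairwise_lt _ _ trigKey hperm hp
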